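-- pv_equiv track=rewrite | github.com/th2-net/recon-lw | recon_lw/recon_ob.py | combine_operations
-- ===== SOURCE A (Python) =====
-- def combine_operations(operations_list):
--     combined_operations = [[]]
--     for operation_entry in operations_list:
--         if len(combined_operations[-1]) == 0:
--             combined_operations[-1].append(operation_entry)
--         else:
--             # if operation_entry[2]["messageId"] == combined_operations[-1][-1][2]["messageId"]:
--             if operation_entry[1]["str_time_of_event"] == combined_operations[-1][-1][1]["str_time_of_event"]:
--                 combined_operations[-1].append(operation_entry)
--             else:
--                 combined_operations.append([operation_entry])
--     return combined_operations
-- ===== SOURCE B (Python) =====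
-- def combine_operations(operations_list):
--     # Split the list into maximal runs of adjacent-equal event times by
--     # measuring each run's length up front, then slicing it off whole.
--     if not operations_list:
--         return [[]]
--     out = []
--     rest = operations_list
--     while rest:
--         i = 1
--         while i < len(rest) and rest[i][1]["str_time_of_event"] == rest[i - 1][1]["str_time_of_event"]:
--             i += 1
--         out.append(rest[:i])
--         rest = rest[i:]
--     return out
-- ===== Notes on version B (the rewrite author's own statement) =====
-- stated objective: alternative
-- what changed: Replaces A's accumulator loop that mutates the last group of a seeded [[]] result with a run-splitting scan: measure the length of the next run of equal event times, slice it off whole, repeat; empty input keeps the single empty group.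
import Mathlib
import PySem

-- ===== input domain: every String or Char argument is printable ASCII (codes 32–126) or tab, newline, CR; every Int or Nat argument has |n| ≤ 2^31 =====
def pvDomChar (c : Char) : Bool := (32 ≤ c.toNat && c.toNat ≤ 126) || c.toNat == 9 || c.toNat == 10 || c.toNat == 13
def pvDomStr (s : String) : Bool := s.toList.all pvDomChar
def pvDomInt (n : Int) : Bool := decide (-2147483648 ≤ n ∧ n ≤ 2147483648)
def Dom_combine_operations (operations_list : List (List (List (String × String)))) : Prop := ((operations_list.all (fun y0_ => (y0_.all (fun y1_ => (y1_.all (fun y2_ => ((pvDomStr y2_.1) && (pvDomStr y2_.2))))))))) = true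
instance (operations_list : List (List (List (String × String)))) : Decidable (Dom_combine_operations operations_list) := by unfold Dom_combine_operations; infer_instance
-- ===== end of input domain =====

-- B groups the list into maximal runs of adjacent-equal 'str_time_of_event' by slicing
-- each run off whole, instead of A's mutate-the-last-group accumulator loop; objective: alternative.

-- op[1]["str_time_of_event"]; total with defaults — Pre_ guarantees the lookups succeed,
-- so the defaults are never reached on admitted inputs (dict lookup = first match via List.lookup).
def pvKey (op : List (List (String × String))) : String :=
  ((PySem.List.pyGetD op 1 []).lookup "str_time_of_event").getD ""

-- ===== PORT A =====
-- A's loop body, verbatim: branch order and the combined[-1] manipulations as in the Python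
def pvStepA (combined : List (List (List (List (String × String))))) (op : List (List (String × String))) :
    List (List (List (List (String × String)))) :=
  let last := combined.getLastD []
  if last.length = 0 then
    combined.dropLast ++ [last ++ [op]]
  else if pvKey op = pvKey (last.getLastD []) then
    combined.dropLast ++ [last ++ [op]]
  else
    combined ++ [[op]]

def combine_operations (operations_list : List (List (List (String × String)))) : List (List (List (List (String × String)))) :=
  operations_list.foldl pvStepA [[]]

-- ===== PORT B =====
-- inner while loop of Source B: length of the maximal adjacent-equal-key run at the front
def pvRunLen : List (List (List (String × String))) → Nat
  | [] => 0
  | [_] => 1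
  | a :: b :: t => if pvKey b = pvKey a then 1 + pvRunLen (b :: t) else 1

theorem pvRunLen_pos (a : List (List (String × String))) (t : List (List (List (String × String)))) :
    0 < pvRunLen (a :: t) := by
  cases t <;> simp only [pvRunLen] <;> first | omega | (split <;> omega)

-- outer while loop of Source B; rest[:i]/rest[i:] = take/drop since 0 ≤ i ≤ len rest (exact slices)
def pvRuns : List (List (List (String × String))) → List (List (List (List (String × String))))
  | [] => []
  | a :: t =>
    let i := pvRunLen (a :: t)
    (a :: t).take i :: pvRuns ((a :: t).drop i)
  termination_by l => l.length
  decreasing_by have := pvRunLen_pos a t; simp; omega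

def combine_operations_alt (operations_list : List (List (List (String × String)))) : List (List (List (List (String × String)))) :=
  if operations_list.isEmpty then [[]] else pvRuns operations_list

-- ===== PRECONDITION & SPEC =====
-- Exactly where Python A returns: with ≥ 2 entries every entry's op[1]["str_time_of_event"]
-- lookup is performed (IndexError/KeyError otherwise); with ≤ 1 entries no lookup happens.
def Pre_combine_operations (operations_list : List (List (List (String × String)))) : Prop :=
  operations_list.length ≤ 1 ∨
    ∀ op ∈ operations_list,
      1 < op.length ∧ "str_time_of_event" ∈ (op.getD 1 []).map Prod.fst
instance (operations_list : List (List (List (String × String)))) : Decidable (Pre_combine_operations operations_list) := by unfold Pre_combine_operations; infer_instance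

def pvWitness_combine_operations : (List (List (List (String × String)))) :=
  [[[("a", "b")], [("str_time_of_event", "t1")]], [[], [("str_time_of_event", "t2")]]]

def Spec_combine_operations (operations_list : List (List (List (String × String)))) (out : List (List (List (List (String × String))))) : Prop := out = combine_operations_alt operations_list
instance (operations_list : List (List (List (String × String)))) (out : List (List (List (List (String × String))))) : Decidable (Spec_combine_operations operations_list out) := by unfold Spec_combine_operations; infer_instance

-- ===== CLAIM (what is proved, stated in full; the proofs are below) =====
def Claim_equal_combine_operations : Prop := ∀ (operations_list : List (List (List (String × String)))), Dom_combine_operations operations_list → Pre_combine_operations operations_list → Spec_combine_operations operations_list (combine_operations operations_list)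

-- ===== LEMMAS AND PROOFS =====

-- proof-side reference recursion: A's loop after the first entry, with the current group and its last entry explicit
def pvComb (cur : List (List (List (String × String)))) (last : List (List (String × String))) :
    List (List (List (String × String))) → List (List (List (List (String × String))))
  | [] => [cur]
  | op :: t => if pvKey op = pvKey last then pvComb (cur ++ [op]) op t
               else cur :: pvComb [op] op t

-- chain-match count against a preceding entry
def pvM (last : List (List (String × String))) : List (List (List (String × String))) → Nat
  | [] => 0
  | b :: t => if pvKey b = pvKey last then 1 + pvM b t else 0

theorem pvRunLen_eq (a : List (List (String × String))) (t : List (List (List (String × String)))) :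
    pvRunLen (a :: t) = 1 + pvM a t := by
  induction t generalizing a with
  | nil => simp [pvRunLen, pvM]
  | cons b t ih => simp only [pvRunLen, pvM]; split <;> simp [ih]

theorem pvComb_eq_runs (t : List (List (List (String × String))))
    (cur : List (List (List (String × String)))) (last : List (List (String × String))) :
    pvComb cur last t = (cur ++ t.take (pvM last t)) :: pvRuns (t.drop (pvM last t)) := by
  induction t generalizing cur last with
  | nil => simp [pvComb, pvM, pvRuns]
  | cons b t ih =>
    simp only [pvComb, pvM]
    split
    · rw [ih, Nat.add_comm 1 (pvM b t)]
      simp [List.take_succ_cons, List.drop_succ_cons]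
    · simp only [List.take_zero, List.append_nil, List.drop_zero]
      rw [pvRuns, pvRunLen_eq, Nat.add_comm 1 (pvM b t), ih]
      simp

theorem pvStepA_eq (prev : List (List (List (List (String × String)))))
    (cur : List (List (List (String × String)))) (op : List (List (String × String))) (h : cur ≠ []) :
    pvStepA (prev ++ [cur]) op =
      if pvKey op = pvKey (cur.getLast h) then prev ++ [cur ++ [op]]
      else (prev ++ [cur]) ++ [[op]] := by
  unfold pvStepA
  have hlast : (prev ++ [cur]).getLastD [] = cur := by simp
  have hgl : cur.getLastD [] = cur.getLast h := by
    rw [List.getLastD_eq_getLast?, List.getLast?_eq_some_getLast h]; rfl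
  have hlen : ¬ cur.length = 0 := by simpa using h
  rw [hlast]
  simp only [hgl]
  rw [if_neg hlen]
  split <;> simp

theorem pvFoldA_eq (t : List (List (List (String × String))))
    (prev : List (List (List (List (String × String)))))
    (cur : List (List (List (String × String)))) (h : cur ≠ []) :
    t.foldl pvStepA (prev ++ [cur]) = prev ++ pvComb cur (cur.getLast h) t := by
  induction t generalizing prev cur with
  | nil => simp [pvComb]
  | cons op t ih =>
    rw [List.foldl_cons, pvStepA_eq prev cur op h, pvComb]
    split
    · have := ih prev (cur ++ [op]) (by simp)
      simp only [List.getLast_append] at this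
      simpa using this
    · have := ih (prev ++ [cur]) [op] (by simp)
      simp only [List.getLast_singleton] at this
      rw [this]
      simp

theorem combine_eq_alt (ops : List (List (List (String × String)))) :
    combine_operations ops = combine_operations_alt ops := by
  cases ops with
  | nil => simp [combine_operations, combine_operations_alt]
  | cons a t =>
    unfold combine_operations combine_operations_alt
    simp only [List.isEmpty_cons, Bool.false_eq_true, if_false, List.foldl_cons]
    have h1 : pvStepA [[]] a = [] ++ [[a]] := by simp [pvStepA]
    rw [h1, pvFoldA_eq t [] [a] (by simp)]
    simp only [List.getLast_singleton, List.nil_append]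
    rw [pvComb_eq_runs, pvRuns, pvRunLen_eq, Nat.add_comm 1 (pvM a t)]
    simp

-- ===== VERDICT (by name: the statement is the Claim_ definition above) =====
theorem combine_operations_spec : Claim_equal_combine_operations := by
  intro ops _ _
  unfold Spec_combine_operations
  exact combine_eq_alt ops
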